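-- pv_equiv track=rewrite | github.com/Sydeva/xdiag | cantedAFM/genlatC6.py | _orbit_r6
-- ===== SOURCE A (Python) =====
-- def _r6_star_int(fq1, fq2, ncell):
--     """
--     R6* dual action in integer reduced reciprocal coordinates.
--
--     Derivation: R6*q = (R6^{-T})q.  R6^{-1} = [[1,1],[-1,0]] in lattice coords.
--     Transposing: (R6^{-T}) maps (q1, q2) → (q1 - q2, q1).
--     Integer form: ((fq1 - fq2) % N, fq1 % N).
--     """
--     return ((fq1 - fq2) % ncell, fq1 % ncell)
--
-- def _orbit_r6(fq, ncell):
--     """C6 orbit of fq (unique elements in traversal order)."""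
--     orbit = []
--     cur = fq
--     for _ in range(6):
--         if cur in orbit:
--             break
--         orbit.append(cur)
--         cur = _r6_star_int(cur[0], cur[1], ncell)
--     return orbit
-- ===== SOURCE B (Python) =====
-- def _r6_star_int(fq1, fq2, ncell):
--     return ((fq1 - fq2) % ncell, fq1 % ncell)
--
-- def _orbit_r6(fq, ncell):
--     # R6* has order 6, so the six iterates have the closed forms below
--     # (derived by composing (q1, q2) -> (q1 - q2, q1) five times);
--     # the orbit is their unique elements in first-seen order.
--     a, b = fq
--     points = [fq,
--               ((a - b) % ncell, a % ncell),
--               ((-b) % ncell, (a - b) % ncell),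
--               ((-a) % ncell, (-b) % ncell),
--               ((b - a) % ncell, (-a) % ncell),
--               (b % ncell, (b - a) % ncell)]
--     return list(dict.fromkeys(points))
-- ===== Notes on version B (the rewrite author's own statement) =====
-- stated objective: simpler
-- what changed: B replaces A's iterate-and-scan loop (membership test over the accumulated orbit, break on first repeat) by the closed-form list of the six R6* iterates (R6* has order 6, so the iterates are explicit linear forms in fq mod ncell) deduplicated in first-seen order via list(dict.fromkeys(...)).
import Mathlib
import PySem

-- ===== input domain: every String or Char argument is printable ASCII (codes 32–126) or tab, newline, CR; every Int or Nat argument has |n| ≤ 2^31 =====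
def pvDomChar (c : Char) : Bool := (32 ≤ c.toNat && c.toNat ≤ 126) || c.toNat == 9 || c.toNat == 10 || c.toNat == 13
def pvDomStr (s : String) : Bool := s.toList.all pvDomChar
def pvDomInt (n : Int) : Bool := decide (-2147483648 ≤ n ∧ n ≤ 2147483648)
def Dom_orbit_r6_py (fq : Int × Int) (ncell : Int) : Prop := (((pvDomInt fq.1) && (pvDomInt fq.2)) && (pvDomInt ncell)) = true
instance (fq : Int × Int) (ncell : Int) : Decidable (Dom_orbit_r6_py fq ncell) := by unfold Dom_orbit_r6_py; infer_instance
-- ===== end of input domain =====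

-- B replaces A's iterate-scan-and-break loop by the closed-form list of the six
-- R6* iterates (R6* has order 6) deduplicated in first-seen order; objective:
-- simpler decomposition (no loop, no membership scan), same cost.

-- ===== PORT A =====
def r6StarA (fq1 fq2 ncell : Int) : Int × Int :=
  (PySem.Int.mod (fq1 - fq2) ncell, PySem.Int.mod fq1 ncell)

def orbitLoopA (n : Nat) (orbit : List (Int × Int)) (cur : Int × Int) (ncell : Int) :
    List (Int × Int) :=
  match n with
  | 0 => orbit
  | n + 1 =>
    if cur ∈ orbit then orbit
    else orbitLoopA n (orbit ++ [cur]) (r6StarA cur.1 cur.2 ncell) ncell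

def orbit_r6_py (fq : Int × Int) (ncell : Int) : List (Int × Int) :=
  orbitLoopA 6 [] fq ncell

-- ===== PORT B =====
def orbit_r6_py_alt (fq : Int × Int) (ncell : Int) : List (Int × Int) :=
  let a := fq.1
  let b := fq.2
  PySem.List.dedup
    [fq,
     (PySem.Int.mod (a - b) ncell, PySem.Int.mod a ncell),
     (PySem.Int.mod (-b) ncell, PySem.Int.mod (a - b) ncell),
     (PySem.Int.mod (-a) ncell, PySem.Int.mod (-b) ncell),
     (PySem.Int.mod (b - a) ncell, PySem.Int.mod (-a) ncell),
     (PySem.Int.mod b ncell, PySem.Int.mod (b - a) ncell)]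

-- ===== PRECONDITION & SPEC =====
-- Pre_ excludes ncell = 0, where Python's '%' raises ZeroDivisionError (in A and in B alike).
def Pre_orbit_r6_py (fq : Int × Int) (ncell : Int) : Prop := ncell ≠ 0
instance (fq : Int × Int) (ncell : Int) : Decidable (Pre_orbit_r6_py fq ncell) := by
  unfold Pre_orbit_r6_py; infer_instance

def pvWitness_orbit_r6_py : (Int × Int) × Int := ((1, 2), 4)

def Spec_orbit_r6_py (fq : Int × Int) (ncell : Int) (out : List (Int × Int)) : Prop :=
  out = orbit_r6_py_alt fq ncell
instance (fq : Int × Int) (ncell : Int) (out : List (Int × Int)) :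
    Decidable (Spec_orbit_r6_py fq ncell out) := by unfold Spec_orbit_r6_py; infer_instance

-- ===== CLAIM (what is proved, stated in full; the proofs are below) =====
def Claim_equal_orbit_r6_py : Prop :=
  ∀ (fq : Int × Int) (ncell : Int), Dom_orbit_r6_py fq ncell → Pre_orbit_r6_py fq ncell →
    Spec_orbit_r6_py fq ncell (orbit_r6_py fq ncell)

-- ===== LEMMAS AND PROOFS =====
-- The list of the next n iterates of A's map starting AT cur (proof helper).
def iterF (ncell : Int) : Nat → (Int × Int) → List (Int × Int)
  | 0, _ => []
  | n + 1, cur => cur :: iterF ncell n (r6StarA cur.1 cur.2 ncell)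

-- mod-congruence facts (Python % is Int.fmod)
theorem pymod_pymod (x n : Int) :
    PySem.Int.mod (PySem.Int.mod x n) n = PySem.Int.mod x n :=
  Int.fmod_fmod_of_dvd x dvd_rfl

theorem pymod_sub (x y n : Int) :
    PySem.Int.mod (PySem.Int.mod x n - PySem.Int.mod y n) n = PySem.Int.mod (x - y) n :=
  (Int.sub_fmod x y n).symm

theorem dedup_append_of_subset (xs ys : List (Int × Int)) (h : ∀ y ∈ ys, y ∈ xs) :
    PySem.List.dedup (xs ++ ys) = PySem.List.dedup xs := by
  induction ys generalizing xs with
  | nil => simp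
  | cons y ys ih =>
    have hy : y ∈ xs := h y (by simp)
    have : xs ++ y :: ys = (xs ++ [y]) ++ ys := by simp
    rw [this, ih (xs ++ [y]) (by
      intro z hz
      have := h z (List.mem_cons_of_mem _ hz)
      simp [this])]
    simp only [PySem.List.dedup_eq_ofList, PySem.Set.ofList_eq_foldl, List.foldl_append,
      List.foldl]
    have hmem : y ∈ List.foldl PySem.Set.add [] xs := by
      rw [← PySem.Set.ofList_eq_foldl, PySem.Set.mem_ofList]; exact hy
    simp [PySem.Set.add, PySem.Set.contains, hmem]

theorem iterF_subset (ncell : Int) (orb : List (Int × Int))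
    (hcl : ∀ x ∈ orb, r6StarA x.1 x.2 ncell ∈ orb) :
    ∀ (n : Nat) (x : Int × Int), x ∈ orb → ∀ y ∈ iterF ncell n x, y ∈ orb := by
  intro n
  induction n with
  | zero => intro x _ y hy; simp [iterF] at hy
  | succ n ih =>
    intro x hx y hy
    simp only [iterF, List.mem_cons] at hy
    rcases hy with rfl | hy
    · exact hx
    · exact ih _ (hcl x hx) y hy

theorem orbitLoopA_eq_dedup (ncell : Int) :
    ∀ (n : Nat) (orb : List (Int × Int)) (cur : Int × Int), orb.Nodup →
      (∀ x ∈ orb, r6StarA x.1 x.2 ncell ∈ orb ++ [cur]) →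
      orbitLoopA n orb cur ncell = PySem.List.dedup (orb ++ iterF ncell n cur) := by
  intro n
  induction n with
  | zero =>
    intro orb cur hnd _
    simp only [orbitLoopA, iterF, List.append_nil, PySem.List.dedup_eq_ofList]
    exact (PySem.Set.ofList_eq_self_of_nodup orb hnd).symm
  | succ n ih =>
    intro orb cur hnd hcl
    by_cases hc : cur ∈ orb
    · -- loop breaks; every remaining iterate is already in orb
      have hcl' : ∀ x ∈ orb, r6StarA x.1 x.2 ncell ∈ orb := by
        intro x hx
        rcases List.mem_append.1 (hcl x hx) with h | h
        · exact h
        · simp at h; rw [h]; exact hc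
      have hsub : ∀ y ∈ iterF ncell (n + 1) cur, y ∈ orb :=
        iterF_subset ncell orb hcl' (n + 1) cur hc
      simp only [orbitLoopA, if_pos hc]
      rw [dedup_append_of_subset orb _ hsub, PySem.List.dedup_eq_ofList,
        PySem.Set.ofList_eq_self_of_nodup orb hnd]
    · simp only [orbitLoopA, if_neg hc, iterF]
      have hnd' : (orb ++ [cur]).Nodup := by
        rw [List.nodup_append]
        refine ⟨hnd, List.nodup_singleton _, ?_⟩
        intro a ha b hb
        simp only [List.mem_singleton] at hb
        subst hb
        exact fun h => hc (h ▸ ha)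
      have hcl' : ∀ x ∈ orb ++ [cur],
          r6StarA x.1 x.2 ncell ∈ (orb ++ [cur]) ++ [r6StarA cur.1 cur.2 ncell] := by
        intro x hx
        rcases List.mem_append.1 hx with h | h
        · exact List.mem_append_left _ (hcl x h)
        · simp at h; subst h; simp
      rw [ih (orb ++ [cur]) _ hnd' hcl']
      simp

-- B's closed-form list IS the list of the six iterates of A's map.
theorem sixList_eq_iterF (fq : Int × Int) (ncell : Int) :
    [fq,
     (PySem.Int.mod (fq.1 - fq.2) ncell, PySem.Int.mod fq.1 ncell),
     (PySem.Int.mod (-fq.2) ncell, PySem.Int.mod (fq.1 - fq.2) ncell),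
     (PySem.Int.mod (-fq.1) ncell, PySem.Int.mod (-fq.2) ncell),
     (PySem.Int.mod (fq.2 - fq.1) ncell, PySem.Int.mod (-fq.1) ncell),
     (PySem.Int.mod fq.2 ncell, PySem.Int.mod (fq.2 - fq.1) ncell)] =
    iterF ncell 6 fq := by
  obtain ⟨a, b⟩ := fq
  simp only [iterF, r6StarA, pymod_pymod, pymod_sub]
  ring_nf

theorem orbit_eq (fq : Int × Int) (ncell : Int) :
    orbit_r6_py fq ncell = orbit_r6_py_alt fq ncell := by
  unfold orbit_r6_py orbit_r6_py_alt
  rw [orbitLoopA_eq_dedup ncell 6 [] fq List.nodup_nil (by simp)]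
  rw [List.nil_append, ← sixList_eq_iterF fq ncell]

-- ===== VERDICT (by name: the statement is the Claim_ definition above) =====
theorem orbit_r6_py_spec : Claim_equal_orbit_r6_py := by
  intro fq ncell _ _
  unfold Spec_orbit_r6_py
  exact orbit_eq fq ncell
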